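-- pv_equiv track=rewrite | github.com/saif177/Hackerrank-DSA-practice | circular-array-rotation.py | circularArrayRotation
-- ===== SOURCE A (Python) =====
-- def circularArrayRotation(a, k, queries):
--     # Write your code here
--     n = len(a)
--     k = k % n
--     res = []
--     for q in queries:
--         rotated_index = (q - k + n) % n
--         res.append(a[rotated_index])
--
--     return res
-- ===== SOURCE B (Python) =====
-- def circularArrayRotation(a, k, queries):
--     n = len(a)
--     k = k % n
--     rotated = a[n - k:] + a[:n - k]
--     return [rotated[q % n] for q in queries]
-- ===== Notes on version B (the rewrite author's own statement) =====
-- stated objective: alternative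
-- what changed: B builds the rotated array once with two slices and answers each query by a direct table lookup at q % n, instead of A's per-query modular index arithmetic into the original array.
import Mathlib
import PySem

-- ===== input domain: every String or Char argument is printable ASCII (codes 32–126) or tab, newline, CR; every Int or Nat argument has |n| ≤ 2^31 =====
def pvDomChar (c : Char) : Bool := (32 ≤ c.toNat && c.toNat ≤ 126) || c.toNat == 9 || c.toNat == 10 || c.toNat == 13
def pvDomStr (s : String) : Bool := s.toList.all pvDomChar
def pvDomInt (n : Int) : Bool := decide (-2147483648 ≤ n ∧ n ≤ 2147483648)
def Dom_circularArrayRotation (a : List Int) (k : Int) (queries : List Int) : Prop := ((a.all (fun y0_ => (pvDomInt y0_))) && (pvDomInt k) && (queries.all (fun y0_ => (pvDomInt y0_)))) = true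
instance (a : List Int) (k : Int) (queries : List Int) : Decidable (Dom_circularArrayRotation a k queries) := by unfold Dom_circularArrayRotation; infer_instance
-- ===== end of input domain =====

-- B precomputes the rotated array with two slices and looks queries up in it; same cost, different decomposition.

-- ===== PORT A =====
-- a[rotated_index] is ported as pyGetD …/0; under Pre_ (a ≠ []) the index (q-k'+n)%n is
-- always in [0, n), so the default is never used and the port is exact.
def circularArrayRotation (a : List Int) (k : Int) (queries : List Int) : List Int :=
  let n : Int := a.length
  let k' := PySem.Int.mod k n
  queries.foldl (fun res q => res ++ [PySem.List.pyGetD a (PySem.Int.mod (q - k' + n) n) 0]) []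

-- ===== PORT B =====
-- rotated[q % n] is ported as pyGetD …/0; under Pre_ the index q % n is always in [0, n).
def circularArrayRotation_alt (a : List Int) (k : Int) (queries : List Int) : List Int :=
  let n : Int := a.length
  let k' := PySem.Int.mod k n
  let rotated := PySem.List.slice a (some (n - k')) none ++ PySem.List.slice a none (some (n - k'))
  queries.map (fun q => PySem.List.pyGetD rotated (PySem.Int.mod q n) 0)

-- ===== PRECONDITION & SPEC =====
-- Pre_ excludes a = [], where both A and B raise ZeroDivisionError at k % len(a).
def Pre_circularArrayRotation (a : List Int) (k : Int) (queries : List Int) : Prop := a ≠ []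
instance (a : List Int) (k : Int) (queries : List Int) : Decidable (Pre_circularArrayRotation a k queries) := by unfold Pre_circularArrayRotation; infer_instance
def pvWitness_circularArrayRotation : List Int × Int × List Int := ([3, 4, 5], 2, [0, 1, 2, -1, 7])
def Spec_circularArrayRotation (a : List Int) (k : Int) (queries : List Int) (out : List Int) : Prop := out = circularArrayRotation_alt a k queries
instance (a : List Int) (k : Int) (queries : List Int) (out : List Int) : Decidable (Spec_circularArrayRotation a k queries out) := by unfold Spec_circularArrayRotation; infer_instance

-- ===== CLAIM (what is proved, stated in full; the proofs are below) =====
def Claim_equal_circularArrayRotation : Prop := ∀ (a : List Int) (k : Int) (queries : List Int), Dom_circularArrayRotation a k queries → Pre_circularArrayRotation a k queries → Spec_circularArrayRotation a k queries (circularArrayRotation a k queries)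

-- ===== LEMMAS AND PROOFS =====

-- pointwise agreement of the two query answers
theorem pv_lookup_eq (a : List Int) (k q : Int) (ha : a ≠ []) :
    PySem.List.pyGetD a (PySem.Int.mod (q - PySem.Int.mod k (a.length : Int) + (a.length : Int)) (a.length : Int)) 0
      = PySem.List.pyGetD
          (PySem.List.slice a (some ((a.length : Int) - PySem.Int.mod k (a.length : Int))) none
            ++ PySem.List.slice a none (some ((a.length : Int) - PySem.Int.mod k (a.length : Int))))
          (PySem.Int.mod q (a.length : Int)) 0 := by
  have hn : 0 < (a.length : Int) := by
    have := List.length_pos_iff.mpr ha; exact_mod_cast this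
  set n : Int := (a.length : Int) with hndef
  set k' : Int := PySem.Int.mod k n with hk
  have hk0 : 0 ≤ k' := PySem.Int.mod_nonneg k hn
  have hkn : k' < n := PySem.Int.mod_lt k hn
  -- slices → drop/take
  have hj : (0:Int) ≤ n - k' := by omega
  have hsl1 : PySem.List.slice a (some (n - k')) none = a.drop (n - k').toNat := by
    have h : n - k' = ((n - k').toNat : Int) := by omega
    rw [h, PySem.List.slice_from_natCast]; congr 1
  have hsl2 : PySem.List.slice a none (some (n - k')) = a.take (n - k').toNat := by
    have h : n - k' = ((n - k').toNat : Int) := by omega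
    rw [h, PySem.List.slice_to_natCast]; congr 1
  rw [hsl1, hsl2]
  -- mods → emod, bounds
  rw [PySem.Int.mod_eq_emod_of_pos hn, PySem.Int.mod_eq_emod_of_pos hn]
  set i2 : Int := q % n with hi2
  have hi20 : 0 ≤ i2 := Int.emod_nonneg q (by omega)
  have hi2n : i2 < n := Int.emod_lt_of_pos q hn
  have hq : (q - k' + n) % n = (i2 - k') % n := by
    have h1 : (q - k' + n) % n = (q - k') % n := by
      rw [show q - k' + n = (q - k') + n * 1 by ring, Int.add_mul_emod_self_left]
    have h2 : (i2 - k') % n = (q - k') % n := by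
      rw [hi2, Int.sub_emod, Int.emod_emod_of_dvd _ (dvd_refl n), ← Int.sub_emod]
    rw [h1, h2]
  rw [hq]
  -- lengths as Nats
  have hlen : (n - k').toNat + k'.toNat = a.length := by omega
  have hdlen : (a.drop (n - k').toNat).length = k'.toNat := by
    simp [List.length_drop]; omega
  by_cases hc : k' ≤ i2
  · -- i2 - k' in [0, n): index lands in the take part
    have hval : (i2 - k') % n = i2 - k' := Int.emod_eq_of_lt (by omega) (by omega)
    rw [hval]
    rw [PySem.List.pyGetD_eq_getElem _ _ (by omega) (by omega),
        PySem.List.pyGetD_eq_getElem _ _ (by omega)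
          (by simp [List.length_append, List.length_drop, List.length_take]; omega)]
    rw [List.getElem_append_right (by omega)]
    rw [List.getElem_take]
    congr 1
    omega
  · -- i2 < k': wraps, lands in the drop part
    have hval : (i2 - k') % n = i2 - k' + n := by
      have h1 : (i2 - k' + n) % n = (i2 - k') % n := by
        rw [show i2 - k' + n = (i2 - k') + n * 1 by ring, Int.add_mul_emod_self_left]
      rw [← h1]; exact Int.emod_eq_of_lt (by omega) (by omega)
    rw [hval]
    rw [PySem.List.pyGetD_eq_getElem _ _ (by omega) (by omega),
        PySem.List.pyGetD_eq_getElem _ _ (by omega)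
          (by simp [List.length_append, List.length_drop, List.length_take]; omega)]
    rw [List.getElem_append_left (by omega)]
    rw [List.getElem_drop]
    congr 1
    omega

-- ===== VERDICT (by name: the statement is the Claim_ definition above) =====
theorem circularArrayRotation_spec : Claim_equal_circularArrayRotation := by
  intro a k queries _ ha
  unfold Spec_circularArrayRotation circularArrayRotation circularArrayRotation_alt
  simp only []
  rw [PySem.List.foldl_append_singleton_eq_map]
  exact List.map_congr_left (fun q _ => pv_lookup_eq a k q ha)
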